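-- pv_equiv track=rewrite | github.com/NLebedev/defi-viewer | backend/app/pair_mapping.py | _expand_token
-- ===== SOURCE A (Python) =====
-- TOKEN_EQUIVALENCES: dict[str, str] = {
--     "WSOL": "SOL",
-- }
--
-- def _expand_token(token: str) -> set[str]:
--     """Expand a token with its equivalences."""
--     result = {token}
--     if token in TOKEN_EQUIVALENCES:
--         result.add(TOKEN_EQUIVALENCES[token])
--     for k, v in TOKEN_EQUIVALENCES.items():
--         if v == token:
--             result.add(k)
--     return result
-- ===== SOURCE B (Python) =====
-- # B: precomputed symmetric adjacency map; per-call work is one dict lookup, no scan.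
-- TOKEN_EQUIVALENCES: dict[str, str] = {
--     "WSOL": "SOL",
-- }
--
-- EQUIV_CLOSURE: dict[str, set] = {}
-- for _k, _v in TOKEN_EQUIVALENCES.items():
--     EQUIV_CLOSURE.setdefault(_k, set()).add(_v)
--     EQUIV_CLOSURE.setdefault(_v, set()).add(_k)
--
-- def _expand_token(token: str) -> set:
--     """Expand a token with its equivalences."""
--     return {token} | EQUIV_CLOSURE.get(token, set())
-- ===== Notes on version B (the rewrite author's own statement) =====
-- stated objective: simpler
-- what changed: Replaces the per-call forward check plus full reverse scan over TOKEN_EQUIVALENCES with a module-level symmetric closure map built once, so the call is a single lookup unioned with {token}.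
import Mathlib
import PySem

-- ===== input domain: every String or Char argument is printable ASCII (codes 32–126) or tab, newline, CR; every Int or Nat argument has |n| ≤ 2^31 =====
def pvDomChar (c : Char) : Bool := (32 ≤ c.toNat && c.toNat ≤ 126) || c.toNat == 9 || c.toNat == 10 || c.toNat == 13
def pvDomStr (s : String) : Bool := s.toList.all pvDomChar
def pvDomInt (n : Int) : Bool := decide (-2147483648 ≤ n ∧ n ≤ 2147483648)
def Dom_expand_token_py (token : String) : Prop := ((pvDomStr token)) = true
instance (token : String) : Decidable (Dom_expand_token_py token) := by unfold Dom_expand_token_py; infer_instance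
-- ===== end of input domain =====

-- ===== PORT A =====
-- B replaces A's per-call forward check + reverse scan with a precomputed symmetric closure map; return-value equivalence only.
def TOKEN_EQUIVALENCES : PySem.Dict String String := PySem.Dict.ofList [("WSOL", "SOL")]

def expand_token_py (token : String) : List String :=
  let result : PySem.Set String := PySem.Set.ofList [token]
  let result :=
    match TOKEN_EQUIVALENCES.get? token with
    | some v => PySem.Set.add result v
    | none => result
  TOKEN_EQUIVALENCES.items.foldl
    (fun r kv => if kv.2 == token then PySem.Set.add r kv.1 else r) result

-- ===== PORT B =====
def pvAddEdge (d : PySem.Dict String (PySem.Set String)) (a b : String) :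
    PySem.Dict String (PySem.Set String) :=
  d.insert a (PySem.Set.add (d.getD a PySem.Set.empty) b)

def EQUIV_CLOSURE : PySem.Dict String (PySem.Set String) :=
  TOKEN_EQUIVALENCES.items.foldl
    (fun d kv => pvAddEdge (pvAddEdge d kv.1 kv.2) kv.2 kv.1) PySem.Dict.empty

def expand_token_py_alt (token : String) : List String :=
  PySem.Set.union (PySem.Set.ofList [token]) (EQUIV_CLOSURE.getD token PySem.Set.empty)

-- ===== PRECONDITION & SPEC =====
def Spec_expand_token_py (token : String) (out : List String) : Prop := out = expand_token_py_alt token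
instance (token : String) (out : List String) : Decidable (Spec_expand_token_py token out) := by unfold Spec_expand_token_py; infer_instance

-- ===== CLAIM (what is proved, stated in full; the proofs are below) =====
def Claim_equal_expand_token_py : Prop := ∀ (token : String), Dom_expand_token_py token → Spec_expand_token_py token (expand_token_py token)

-- ===== LEMMAS AND PROOFS =====

-- ===== VERDICT (by name: the statement is the Claim_ definition above) =====
lemma pvTE_eq : TOKEN_EQUIVALENCES = PySem.Dict.mk [("WSOL", "SOL")] := by decide

lemma pvEC_eq : EQUIV_CLOSURE = PySem.Dict.mk [("WSOL", ["SOL"]), ("SOL", ["WSOL"])] := by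
  decide

theorem expand_token_py_spec : Claim_equal_expand_token_py := by
  intro token _hd
  unfold Spec_expand_token_py
  by_cases h1 : token = "WSOL"
  · subst h1; decide
  · by_cases h2 : token = "SOL"
    · subst h2; decide
    · have b1 : ("WSOL" == token) = false := by
        simp; exact fun h => h1 h.symm
      have b2 : ("SOL" == token) = false := by
        simp; exact fun h => h2 h.symm
      simp [expand_token_py, expand_token_py_alt, pvTE_eq, pvEC_eq,
        PySem.Dict.get?, PySem.Dict.getD,
        PySem.Set.ofList, PySem.Set.add, PySem.Set.union, PySem.Set.update,
        PySem.Set.empty, b1, b2, List.find?]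
      exact fun h => absurd h.symm h2
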